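-- pv_equiv track=rewrite | github.com/XOQDY/SKE | ComPro/CPL_09-22-63/ex2.py | read_team_data_list
-- ===== SOURCE A (Python) =====
-- def read_name_team(team):
--     name = team[0]
--     return name
--
-- def read_win_team(team):
--     win = int(team[1])
--     return win
--
-- def read_lose_team(team):
--     lose = int(team[2])
--     return lose
--
-- def read_team_data_list(team, total_team):
--     name_list = []
--     win_list = []
--     lose_list = []
--     for x in range(total_team):
--         each_team = team[x].split(",")
--         name_list.append(read_name_team(each_team))
--         win_list.append(read_win_team(each_team))
--         lose_list.append(read_lose_team(each_team))
--     return name_list, win_list, lose_list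
-- ===== SOURCE B (Python) =====
-- def read_team_data_list(team, total_team):
--     used = team[:max(total_team, 0)]
--     name_list = [line.split(",")[0] for line in used]
--     win_list = [int(line.split(",")[1]) for line in used]
--     lose_list = [int(line.split(",")[2]) for line in used]
--     return name_list, win_list, lose_list
-- ===== Notes on version B (the rewrite author's own statement) =====
-- stated objective: alternative
-- what changed: B replaces A's single index loop appending to three parallel accumulators with three independent staged passes over the sliced prefix, each comprehension extracting one column directly from a fresh split.
import Mathlib
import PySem

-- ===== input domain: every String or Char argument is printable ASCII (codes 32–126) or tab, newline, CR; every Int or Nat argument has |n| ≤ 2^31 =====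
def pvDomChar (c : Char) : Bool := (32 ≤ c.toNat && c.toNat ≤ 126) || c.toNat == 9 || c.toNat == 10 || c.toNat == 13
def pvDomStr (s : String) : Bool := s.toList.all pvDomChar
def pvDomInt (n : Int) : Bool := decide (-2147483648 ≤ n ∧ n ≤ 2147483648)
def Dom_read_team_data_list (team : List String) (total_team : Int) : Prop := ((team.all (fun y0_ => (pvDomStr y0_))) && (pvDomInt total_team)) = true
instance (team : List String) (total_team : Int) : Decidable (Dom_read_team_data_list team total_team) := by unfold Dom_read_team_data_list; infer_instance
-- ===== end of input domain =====

-- B replaces A's single index loop with three independent column passes over the sliced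
-- prefix, each extracting one field from a fresh split (objective: alternative).


-- ===== PORT A =====
-- s.split(",") : "," is non-empty so Python's split never raises; split? is some here (exact)
def pvSplit (s : String) : List String := (PySem.Str.split? s ",").getD []

def read_name_team (each : List String) : String :=
  (PySem.List.pyGet? each 0).getD ""          -- each[0]; Pre_ guarantees the index is in range

def read_win_team (each : List String) : Int :=
  ((PySem.List.pyGet? each 1).bind PySem.Int.ofStr?).getD 0   -- int(each[1]); Pre_ guarantees success

def read_lose_team (each : List String) : Int :=
  ((PySem.List.pyGet? each 2).bind PySem.Int.ofStr?).getD 0   -- int(each[2]); Pre_ guarantees success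

def read_team_data_list (team : List String) (total_team : Int) : List String × List Int × List Int :=
  (PySem.List.pyRange 0 total_team 1).foldl
    (fun st x =>
      let each := pvSplit (PySem.List.pyGetD team x "")
      (st.1 ++ [read_name_team each], st.2.1 ++ [read_win_team each], st.2.2 ++ [read_lose_team each]))
    ([], [], [])

-- ===== PORT B =====
def read_team_data_list_alt (team : List String) (total_team : Int) : List String × List Int × List Int :=
  let used := PySem.List.slice team none (some (max total_team 0))
  (used.map (fun line => (PySem.List.pyGet? (pvSplit line) 0).getD ""),
   used.map (fun line => ((PySem.List.pyGet? (pvSplit line) 1).bind PySem.Int.ofStr?).getD 0),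
   used.map (fun line => ((PySem.List.pyGet? (pvSplit line) 2).bind PySem.Int.ofStr?).getD 0))

-- ===== PRECONDITION & SPEC =====
def pvRowOK (s : String) : Bool :=
  let p := pvSplit s
  3 ≤ p.length && (PySem.Int.ofStr? (p.getD 1 "")).isSome && (PySem.Int.ofStr? (p.getD 2 "")).isSome

-- A raises (IndexError) when total_team > len(team), and (ValueError/IndexError) when some
-- used line lacks three comma fields or a non-integer win/lose field; Pre_ excludes exactly those.
def Pre_read_team_data_list (team : List String) (total_team : Int) : Prop :=
  total_team ≤ team.length ∧ ∀ s ∈ team.take total_team.toNat, pvRowOK s = true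
instance (team : List String) (total_team : Int) : Decidable (Pre_read_team_data_list team total_team) := by unfold Pre_read_team_data_list; infer_instance

def pvWitness_read_team_data_list : List String × Int := (["a,1,2", "b, 30 ,-4"], 2)

def Spec_read_team_data_list (team : List String) (total_team : Int) (out : List String × List Int × List Int) : Prop := out = read_team_data_list_alt team total_team
instance (team : List String) (total_team : Int) (out : List String × List Int × List Int) : Decidable (Spec_read_team_data_list team total_team out) := by unfold Spec_read_team_data_list; infer_instance

-- ===== CLAIM (what is proved, stated in full; the proofs are below) =====
def Claim_equal_read_team_data_list : Prop := ∀ (team : List String) (total_team : Int), Dom_read_team_data_list team total_team → Pre_read_team_data_list team total_team → Spec_read_team_data_list team total_team (read_team_data_list team total_team)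

-- ===== LEMMAS AND PROOFS =====

-- A's loop with three appended accumulators is the triple of maps.
theorem pv_fold_append {ι : Type} (f : ι → String) (g h : ι → Int) :
    ∀ (l : List ι) (a : List String) (b c : List Int),
      l.foldl (fun st x => (st.1 ++ [f x], st.2.1 ++ [g x], st.2.2 ++ [h x])) (a, b, c)
        = (a ++ l.map f, b ++ l.map g, c ++ l.map h) := by
  intro l
  induction l with
  | nil => simp
  | cons x xs ih => intro a b c; simp [List.foldl_cons, ih]

theorem pv_range_take {α β : Type} (F : α → β) (d : α) :
    ∀ (m : Nat) (xs : List α), m ≤ xs.length →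
      (List.range m).map (fun k => F (xs.getD k d)) = (xs.take m).map F := by
  intro m
  induction m with
  | zero => simp
  | succ n ih =>
      intro xs h
      rw [List.range_succ, List.take_add_one]
      simp only [List.map_append, List.map_cons, List.map_nil]
      rw [ih xs (by omega)]
      have hn : n < xs.length := by omega
      simp [List.getD, List.getElem?_eq_getElem hn]

theorem read_team_data_list_spec : Claim_equal_read_team_data_list := by
  intro team total_team _ hpre
  obtain ⟨hle, -⟩ := hpre
  unfold Spec_read_team_data_list read_team_data_list read_team_data_list_alt
  have h0 : (0:Int) ≤ max total_team 0 := le_max_right _ _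
  rw [PySem.List.slice_to team h0]
  have hmax : (max total_team 0).toNat = total_team.toNat := by omega
  have ht0 : (total_team - 0).toNat = total_team.toNat := by omega
  have hlen : total_team.toNat ≤ team.length := by omega
  rw [hmax, PySem.List.pyRange_one, List.foldl_map]
  simp only [ht0, PySem.List.pyGetD_natCast, zero_add]
  rw [pv_fold_append (fun k : Nat => read_name_team (pvSplit (team.getD k "")))
        (fun k : Nat => read_win_team (pvSplit (team.getD k "")))
        (fun k : Nat => read_lose_team (pvSplit (team.getD k ""))),
      pv_range_take (fun s => read_name_team (pvSplit s)) "" _ _ hlen,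
      pv_range_take (fun s => read_win_team (pvSplit s)) "" _ _ hlen,
      pv_range_take (fun s => read_lose_team (pvSplit s)) "" _ _ hlen]
  simp [read_name_team, read_win_team, read_lose_team]
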